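-- pv_equiv track=rewrite | github.com/rinapark19/PS | programmers/BF2.py | solution
-- ===== SOURCE A (Python) =====
-- p1 = [1, 2, 3, 4, 5] # len: 5
--
-- p2 = [2, 1, 2, 3, 2, 4, 2, 5] # len: 8
--
-- p3 = [3, 3, 1, 1, 2, 2, 4, 4, 5, 5] # len: 10
--
-- def solution(answers):
--     answer = []
--
--     # 각 사람이 맞힌 문제 개수
--     c1 = 0
--     c2 = 0
--     c3 = 0
--
--     # 각 사람의 찍는 규칙 리스트 이터레이터
--     i1 = 0
--     i2 = 0
--     i3 = 0
--
--     for a in answers: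
--         # 이터레이터가 리스트 넘어갔는지 확인
--         if i1 == 5:
--             i1 = 0
--
--         if i2 == 8:
--             i2 = 0
--
--         if i3 == 10:
--             i3 = 0
--
--         # 문제 맞았는지 확인해서 점수 매기기
--         if p1[i1] == a:
--             c1 += 1
--
--         if p2[i2] == a:
--             c2 += 1
--
--         if p3[i3] == a:
--             c3 += 1
--
--         # 각 이터레이터 늘려 주기
--         i1 += 1
--         i2 += 1
--         i3 += 1
--
--     # 조건에 따라 정답 반환
--     if c1 > c2 and c1 > c3:
--         answer.append(1)
--     elif c2 > c1 and c2 > c3: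
--         answer.append(2)
--     elif c3 > c1 and c3 > c2:
--         answer.append(3)
--     elif c1 == c2 and c1 > c3:
--         answer.append(1)
--         answer.append(2)
--     elif c2 == c3 and c2 > c1:
--         answer.append(2)
--         answer.append(3)
--     elif c3 == c1 and c1 > c2:
--         answer.append(1)
--         answer.append(3)
--     elif c1 == c2 and c2 == c3:
--         answer.append(1)
--         answer.append(2)
--         answer.append(3)
--
--     return answer
-- ===== SOURCE B (Python) =====
-- p1 = [1, 2, 3, 4, 5]
-- p2 = [2, 1, 2, 3, 2, 4, 2, 5]
-- p3 = [3, 3, 1, 1, 2, 2, 4, 4, 5, 5]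
--
-- # one full common period (lcm(5, 8, 10) = 40) of each guessing pattern
-- E1, E2, E3 = p1 * 8, p2 * 5, p3 * 4
--
-- def solution(answers):
--     # index the answers once: how often each (position mod 40, value) pair occurs
--     occ = {}
--     for i, a in enumerate(answers):
--         k = (i % 40, a)
--         occ[k] = occ.get(k, 0) + 1
--     # each score is 40 table lookups against one period; no per-answer pattern comparison
--     scores = [sum(occ.get((r, v), 0) for r, v in enumerate(E)) for E in (E1, E2, E3)]
--     m = max(scores)
--     return [j + 1 for j, s in enumerate(scores) if s == m]
-- ===== Notes on version B (the rewrite author's own statement) =====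
-- stated objective: alternative
-- what changed: Instead of comparing every answer against all three patterns in one loop with manually reset counters and a seven-branch if/elif ladder, B builds a frequency index of (position mod 40, value) pairs in one pass and obtains each score as 40 lookups against a precomputed full-period table, then returns the argmax set via max-and-filter.
import Mathlib
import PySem

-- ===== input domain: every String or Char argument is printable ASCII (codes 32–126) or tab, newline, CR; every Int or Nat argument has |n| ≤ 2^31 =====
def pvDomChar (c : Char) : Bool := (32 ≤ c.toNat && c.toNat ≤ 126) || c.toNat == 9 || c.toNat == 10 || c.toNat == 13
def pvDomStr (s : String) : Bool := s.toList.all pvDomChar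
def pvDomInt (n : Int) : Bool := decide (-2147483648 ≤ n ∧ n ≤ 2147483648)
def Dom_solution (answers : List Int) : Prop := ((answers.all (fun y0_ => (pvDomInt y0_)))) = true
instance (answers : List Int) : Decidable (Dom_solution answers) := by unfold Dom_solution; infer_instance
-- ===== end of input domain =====

-- B replaces A's compare-every-answer-against-all-three-patterns loop (manual counter
-- resets + seven-branch if/elif ladder) by a one-pass frequency index of
-- (position mod 40, value) pairs queried against one precomputed full period (lcm = 40)
-- of each pattern, with max-and-filter result construction (objective: alternative).

-- ===== PORT A =====
def pvP1 : List Int := [1, 2, 3, 4, 5]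
def pvP2 : List Int := [2, 1, 2, 3, 2, 4, 2, 5]
def pvP3 : List Int := [3, 3, 1, 1, 2, 2, 4, 4, 5, 5]

-- one iteration of A's for-loop: resets, three membership tests, increments
def pvStepA (st : Int × Int × Int × Int × Int × Int) (a : Int) :
    Int × Int × Int × Int × Int × Int :=
  let i1 := if st.2.2.2.1 = 5 then 0 else st.2.2.2.1
  let i2 := if st.2.2.2.2.1 = 8 then 0 else st.2.2.2.2.1
  let i3 := if st.2.2.2.2.2 = 10 then 0 else st.2.2.2.2.2
  let c1 := if PySem.List.pyGet? pvP1 i1 = some a then st.1 + 1 else st.1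
  let c2 := if PySem.List.pyGet? pvP2 i2 = some a then st.2.1 + 1 else st.2.1
  let c3 := if PySem.List.pyGet? pvP3 i3 = some a then st.2.2.1 + 1 else st.2.2.1
  (c1, c2, c3, i1 + 1, i2 + 1, i3 + 1)

-- the trailing if/elif ladder of A
def pvLadder (c1 c2 c3 : Int) : List Int :=
  if c1 > c2 ∧ c1 > c3 then [1]
  else if c2 > c1 ∧ c2 > c3 then [2]
  else if c3 > c1 ∧ c3 > c2 then [3]
  else if c1 = c2 ∧ c1 > c3 then [1, 2]
  else if c2 = c3 ∧ c2 > c1 then [2, 3]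
  else if c3 = c1 ∧ c1 > c2 then [1, 3]
  else if c1 = c2 ∧ c2 = c3 then [1, 2, 3]
  else []

def solution (answers : List Int) : List Int :=
  let st := answers.foldl pvStepA (0, 0, 0, 0, 0, 0)
  pvLadder st.1 st.2.1 st.2.2.1

-- ===== PORT B =====
-- E1, E2, E3 = p1 * 8, p2 * 5, p3 * 4  (one full common period, lcm(5,8,10) = 40)
def pvE1 : List Int := (List.replicate 8 pvP1).flatten
def pvE2 : List Int := (List.replicate 5 pvP2).flatten
def pvE3 : List Int := (List.replicate 4 pvP3).flatten

-- occ = {}; for i, a in enumerate(answers): k = (i % 40, a); occ[k] = occ.get(k, 0) + 1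
def pvOcc (answers : List Int) : PySem.Dict (Int × Int) Int :=
  (PySem.List.enumerate answers).foldl
    (fun d ia =>
      let k := (PySem.Int.mod ia.1 40, ia.2)
      d.insert k (d.getD k 0 + 1))
    PySem.Dict.empty

-- sum(occ.get((r, v), 0) for r, v in enumerate(E))
def pvScore (E : List Int) (occ : PySem.Dict (Int × Int) Int) : Int :=
  ((PySem.List.enumerate E).map (fun rv => occ.getD (rv.1, rv.2) 0)).sum

def solution_alt (answers : List Int) : List Int :=
  let occ := pvOcc answers
  let scores : List Int := [pvScore pvE1 occ, pvScore pvE2 occ, pvScore pvE3 occ]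
  let m : Int := (PySem.List.max? scores (fun x => x)).getD 0
  (PySem.List.enumerate scores).filterMap
    (fun ic => if ic.2 = m then some (ic.1 + 1) else none)

-- ===== PRECONDITION & SPEC =====
def Spec_solution (answers : List Int) (out : List Int) : Prop := out = solution_alt answers
instance (answers : List Int) (out : List Int) : Decidable (Spec_solution answers out) := by unfold Spec_solution; infer_instance

-- ===== CLAIM (what is proved, stated in full; the proofs are below) =====
def Claim_equal_solution : Prop := ∀ (answers : List Int), Dom_solution answers → Spec_solution answers (solution answers)

-- ===== LEMMAS AND PROOFS =====

-- reference counter: matches of p against xs starting at absolute index j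
def pvCnt (p : List Int) : Int → List Int → Int
  | _, [] => 0
  | j, a :: rest =>
      (if PySem.List.pyGet? p (PySem.Int.mod j (p.length : Int)) = some a then 1 else 0)
        + pvCnt p (j + 1) rest

theorem pvMod_succ_congr {j j' n : Int} (hn : 0 < n)
    (h : PySem.Int.mod j n = PySem.Int.mod j' n) :
    PySem.Int.mod (j + 1) n = PySem.Int.mod (j' + 1) n := by
  rw [PySem.Int.mod_eq_emod_of_pos hn, PySem.Int.mod_eq_emod_of_pos hn] at h ⊢
  rw [Int.add_emod, h, ← Int.add_emod]

theorem pvMod_small {j n : Int} (h0 : 0 ≤ j) (h1 : j < n) :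
    PySem.Int.mod j n = j := by
  rw [PySem.Int.mod_eq_emod_of_pos (lt_of_le_of_lt h0 h1)]
  exact Int.emod_eq_of_lt h0 h1

-- mod of a bounded nonneg index equals A's manual reset
theorem pvMod_reset {j n : Int} (hn : 0 < n) (h0 : 0 ≤ j) (h1 : j ≤ n) :
    PySem.Int.mod j n = if j = n then 0 else j := by
  by_cases hj : j = n
  · rw [if_pos hj, hj, PySem.Int.mod_eq_emod_of_pos hn]; simp
  · rw [if_neg hj]; exact pvMod_small h0 (lt_of_le_of_ne h1 hj)

theorem pvCnt_congr (p : List Int) (hp : 0 < p.length) :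
    ∀ (xs : List Int) (j j' : Int),
      PySem.Int.mod j (p.length : Int) = PySem.Int.mod j' (p.length : Int) →
      pvCnt p j xs = pvCnt p j' xs := by
  intro xs
  induction xs with
  | nil => intro j j' _; rfl
  | cons a rest ih =>
      intro j j' h
      have hp' : (0 : Int) < ((p.length : Nat) : Int) := by exact_mod_cast hp
      simp only [pvCnt, h, ih (j + 1) (j' + 1) (pvMod_succ_congr hp' h)]

-- A's fold invariant: the three counters accumulate pvCnt from the current indices
theorem pvFoldA (xs : List Int) :
    ∀ (c1 c2 c3 i1 i2 i3 : Int),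
      0 ≤ i1 → i1 ≤ 5 → 0 ≤ i2 → i2 ≤ 8 → 0 ≤ i3 → i3 ≤ 10 →
      (xs.foldl pvStepA (c1, c2, c3, i1, i2, i3)).1 = c1 + pvCnt pvP1 i1 xs ∧
      (xs.foldl pvStepA (c1, c2, c3, i1, i2, i3)).2.1 = c2 + pvCnt pvP2 i2 xs ∧
      (xs.foldl pvStepA (c1, c2, c3, i1, i2, i3)).2.2.1 = c3 + pvCnt pvP3 i3 xs := by
  induction xs with
  | nil => intro c1 c2 c3 i1 i2 i3 _ _ _ _ _ _; simp [pvCnt]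
  | cons a rest ih =>
      intro c1 c2 c3 i1 i2 i3 h10 h11 h20 h21 h30 h31
      have hl1 : ((pvP1.length : Nat) : Int) = 5 := by simp [pvP1]
      have hl2 : ((pvP2.length : Nat) : Int) = 8 := by simp [pvP2]
      have hl3 : ((pvP3.length : Nat) : Int) = 10 := by simp [pvP3]
      have e1 : PySem.Int.mod i1 ((pvP1.length : Nat) : Int) = if i1 = 5 then 0 else i1 := by
        rw [hl1]; exact pvMod_reset (by norm_num) h10 h11
      have e2 : PySem.Int.mod i2 ((pvP2.length : Nat) : Int) = if i2 = 8 then 0 else i2 := by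
        rw [hl2]; exact pvMod_reset (by norm_num) h20 h21
      have e3 : PySem.Int.mod i3 ((pvP3.length : Nat) : Int) = if i3 = 10 then 0 else i3 := by
        rw [hl3]; exact pvMod_reset (by norm_num) h30 h31
      have hb1 : 0 ≤ (if i1 = 5 then 0 else i1) ∧ (if i1 = 5 then 0 else i1) < 5 := by
        split_ifs <;> omega
      have hb2 : 0 ≤ (if i2 = 8 then 0 else i2) ∧ (if i2 = 8 then 0 else i2) < 8 := by
        split_ifs <;> omega
      have hb3 : 0 ≤ (if i3 = 10 then 0 else i3) ∧ (if i3 = 10 then 0 else i3) < 10 := by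
        split_ifs <;> omega
      have hc1 : pvCnt pvP1 (i1 + 1) rest = pvCnt pvP1 ((if i1 = 5 then 0 else i1) + 1) rest := by
        refine pvCnt_congr pvP1 (by simp [pvP1]) rest _ _ (pvMod_succ_congr (by rw [hl1]; norm_num) ?_)
        rw [e1, pvMod_small hb1.1 (by rw [hl1]; exact hb1.2)]
      have hc2 : pvCnt pvP2 (i2 + 1) rest = pvCnt pvP2 ((if i2 = 8 then 0 else i2) + 1) rest := by
        refine pvCnt_congr pvP2 (by simp [pvP2]) rest _ _ (pvMod_succ_congr (by rw [hl2]; norm_num) ?_)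
        rw [e2, pvMod_small hb2.1 (by rw [hl2]; exact hb2.2)]
      have hc3 : pvCnt pvP3 (i3 + 1) rest = pvCnt pvP3 ((if i3 = 10 then 0 else i3) + 1) rest := by
        refine pvCnt_congr pvP3 (by simp [pvP3]) rest _ _ (pvMod_succ_congr (by rw [hl3]; norm_num) ?_)
        rw [e3, pvMod_small hb3.1 (by rw [hl3]; exact hb3.2)]
      have key := ih
        (if PySem.List.pyGet? pvP1 (if i1 = 5 then 0 else i1) = some a then c1 + 1 else c1)
        (if PySem.List.pyGet? pvP2 (if i2 = 8 then 0 else i2) = some a then c2 + 1 else c2)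
        (if PySem.List.pyGet? pvP3 (if i3 = 10 then 0 else i3) = some a then c3 + 1 else c3)
        ((if i1 = 5 then 0 else i1) + 1) ((if i2 = 8 then 0 else i2) + 1)
        ((if i3 = 10 then 0 else i3) + 1)
        (by omega) (by omega) (by omega) (by omega) (by omega) (by omega)
      simp only [List.foldl_cons, pvStepA]
      refine ⟨?_, ?_, ?_⟩
      · rw [key.1, pvCnt, e1, hc1]; split_ifs <;> ring
      · rw [key.2.1, pvCnt, e2, hc2]; split_ifs <;> ring
      · rw [key.2.2, pvCnt, e3, hc3]; split_ifs <;> ring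

-- ===== B-side: the frequency index queried over one period counts pattern matches =====

-- the key list pvOcc counts over
def pvKeys (xs : List Int) : List (Int × Int) :=
  (PySem.List.enumerate xs).map (fun ia => (PySem.Int.mod ia.1 40, ia.2))

theorem pvOcc_eq_counter (xs : List Int) :
    pvOcc xs = PySem.Dict.counter (pvKeys xs) := by
  unfold pvOcc pvKeys
  rw [← PySem.Dict.foldl_insert_getD_add_one_eq_counter, List.foldl_map]

-- summing the indicator of one key over enumerate E picks out E[q] (q = key's index)
theorem pvIndSum (E : List Int) :
    ∀ (s q a : Int), 0 ≤ s →
      ((PySem.List.enumerate E s).map (fun rv => if rv = (q, a) then (1 : Int) else 0)).sum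
        = if s ≤ q ∧ E[(q - s).toNat]? = some a then 1 else 0 := by
  induction E with
  | nil =>
      intro s q a _
      simp [PySem.List.enumerate_nil]
  | cons v rest ih =>
      intro s q a hs
      rw [PySem.List.enumerate_cons]
      simp only [List.map_cons, List.sum_cons, ih (s + 1) q a (by omega)]
      by_cases hq : q = s
      · subst hq
        simp only [sub_self, Int.toNat_zero, List.getElem?_cons_zero, Prod.mk.injEq]
        have : ¬ (q + 1 ≤ q) := by omega
        split_ifs <;> simp_all
      · have hhead : ((s, v) = (q, a)) = False := by
          simp [Prod.ext_iff]; intro h; omega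
        by_cases hlt : s ≤ q
        · have hq1 : s + 1 ≤ q := by omega
          have htn : (q - s).toNat = (q - (s + 1)).toNat + 1 := by omega
          rw [htn]
          simp only [hhead, if_false, List.getElem?_cons_succ, zero_add]
          split_ifs <;> simp_all
        · have h1 : ¬ (s + 1 ≤ q) := by omega
          simp [hhead, h1, hlt]

-- swap the two sums: total occurrence count = per-element indicator sums
theorem pvSumCount (E : List Int) :
    ∀ (ks : List (Int × Int)),
      ((PySem.List.enumerate E).map (fun rv => ((ks.count rv : Nat) : Int))).sum
        = (ks.map (fun k =>
            ((PySem.List.enumerate E).map (fun rv => if rv = k then (1 : Int) else 0)).sum)).sum := by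
  intro ks
  induction ks with
  | nil => simp
  | cons k ks ih =>
      simp only [List.count_cons, List.map_cons, List.sum_cons, ← ih]
      have hpt : ∀ rv : Int × Int,
          ((ks.count rv + if k == rv then 1 else 0 : Nat) : Int)
            = ((ks.count rv : Nat) : Int) + (if rv = k then (1 : Int) else 0) := by
        intro rv
        rcases eq_or_ne k rv with h | h
        · subst h; simp
        · simp [h, Ne.symm h]
      simp only [hpt]
      rw [PySem.List.sum_map_add_int]
      ring

-- the period-table score equals the direct cyclic-match count
theorem pvScoreSum (p E : List Int) (hp : 0 < p.length) (hdvd : p.length ∣ 40)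
    (htab : ∀ r : Nat, r < 40 → E[r]? = PySem.List.pyGet? p ((r % p.length : Nat) : Int)) :
    ∀ (xs : List Int) (s : Int), 0 ≤ s →
      ((PySem.List.enumerate xs s).map (fun ia =>
          ((PySem.List.enumerate E).map
            (fun rv => if rv = (PySem.Int.mod ia.1 40, ia.2) then (1 : Int) else 0)).sum)).sum
        = pvCnt p s xs := by
  intro xs
  induction xs with
  | nil => intro s _; simp [PySem.List.enumerate_nil, pvCnt]
  | cons a rest ih =>
      intro s hs
      rw [PySem.List.enumerate_cons]
      simp only [List.map_cons, List.sum_cons, ih (s + 1) (by omega), pvCnt]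
      congr 1
      rw [pvIndSum E 0 (PySem.Int.mod s 40) a (le_refl 0)]
      have hq0 : 0 ≤ PySem.Int.mod s 40 := PySem.Int.mod_nonneg s (by norm_num)
      have hqlt : PySem.Int.mod s 40 < 40 := PySem.Int.mod_lt s (by norm_num)
      have hqe : PySem.Int.mod s 40 = s % 40 := PySem.Int.mod_eq_emod_of_pos (by norm_num)
      rw [sub_zero]
      have hr : (PySem.Int.mod s 40).toNat < 40 := by omega
      rw [htab _ hr]
      have hpl : (0 : Int) < (p.length : Int) := by exact_mod_cast hp
      have hdvd' : ((p.length : Int)) ∣ (40 : Int) := by exact_mod_cast hdvd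
      have hmm : (((PySem.Int.mod s 40).toNat % p.length : Nat) : Int)
          = PySem.Int.mod s (p.length : Int) := by
        push_cast
        rw [Int.toNat_of_nonneg hq0, hqe, Int.emod_emod_of_dvd s hdvd',
          ← PySem.Int.mod_eq_emod_of_pos hpl]
      rw [hmm]
      have hq0' : (0 : Int) ≤ s % 40 := Int.emod_nonneg s (by norm_num)
      simp [hq0']

-- assembled: each of B's three scores is the cyclic-match count of its pattern
theorem pvScore_eq (p E : List Int) (hp : 0 < p.length) (hdvd : p.length ∣ 40)
    (htab : ∀ r : Nat, r < 40 → E[r]? = PySem.List.pyGet? p ((r % p.length : Nat) : Int))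
    (xs : List Int) :
    pvScore E (pvOcc xs) = pvCnt p 0 xs := by
  unfold pvScore
  have h1 : ∀ rv : Int × Int, (pvOcc xs).getD (rv.1, rv.2) 0 = ((pvKeys xs).count rv : Int) := by
    intro rv
    rw [pvOcc_eq_counter, Prod.mk.eta, PySem.Dict.getD_counter]
  simp only [h1]
  rw [pvSumCount E (pvKeys xs)]
  unfold pvKeys
  rw [List.map_map]
  exact pvScoreSum p E hp hdvd htab xs 0 (le_refl 0)

-- the if/elif ladder equals "indices (1-based) achieving the maximum"
theorem pvLadder_eq_maxFilter (c1 c2 c3 : Int) :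
    pvLadder c1 c2 c3 =
      (PySem.List.enumerate ([c1, c2, c3] : List Int)).filterMap
        (fun ic => if ic.2 = (PySem.List.max? ([c1, c2, c3] : List Int) (fun x => x)).getD 0
                   then some (ic.1 + 1) else none) := by
  have hmax : PySem.List.max? ([c1, c2, c3] : List Int) (fun x => x)
      = some (max (max c1 c2) c3) := by
    rw [PySem.List.max?_id_cons]; simp [List.foldl]
  simp only [hmax, Option.getD_some, PySem.List.enumerate_cons, PySem.List.enumerate_nil,
    List.filterMap_cons, List.filterMap_nil, pvLadder]
  norm_num
  split_ifs <;> first | rfl | (exfalso; omega)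

-- ===== VERDICT (by name: the statement is the Claim_ definition above) =====
theorem solution_spec : Claim_equal_solution := by
  intro answers _
  unfold Spec_solution solution solution_alt
  have hA := pvFoldA answers 0 0 0 0 0 0 (le_refl 0) (by norm_num) (le_refl 0)
    (by norm_num) (le_refl 0) (by norm_num)
  have h1 : pvScore pvE1 (pvOcc answers) = pvCnt pvP1 0 answers :=
    pvScore_eq pvP1 pvE1 (by decide) (by decide) (by decide) answers
  have h2 : pvScore pvE2 (pvOcc answers) = pvCnt pvP2 0 answers :=
    pvScore_eq pvP2 pvE2 (by decide) (by decide) (by decide) answers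
  have h3 : pvScore pvE3 (pvOcc answers) = pvCnt pvP3 0 answers :=
    pvScore_eq pvP3 pvE3 (by decide) (by decide) (by decide) answers
  simp only [h1, h2, h3]
  rw [hA.1, hA.2.1, hA.2.2]
  simp only [zero_add]
  exact pvLadder_eq_maxFilter _ _ _
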